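-- pv_equiv track=rewrite | github.com/repengine/pulse | utils/context7_client.py | _clean_documentation_result
-- ===== SOURCE A (Python) =====
-- def _clean_documentation_result(result: str) -> str:
--     """
--     Clean the documentation result by removing headers or metadata.
--
--     Args:
--         result: The raw documentation result
--
--     Returns:
--         The cleaned documentation content
--     """
--     lines = result.split('\n')
--
--     # Skip lines that appear to be headers or metadata
--     content_lines = []
--     in_content = False
--
--     for line in lines:
--         line_lower = line.lower()
--
--         # Skip empty lines at the beginning
--         if not line.strip() and not in_content:
--             continue
--
--         # Skip obvious header lines
--         if not in_content and (
--             line.startswith("TITLE:") or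
--             line.startswith("DESCRIPTION:") or
--             line.startswith("---") or
--             "documentation for" in line_lower and "context7" in line_lower
--         ):
--             continue
--
--         # We've reached the content
--         in_content = True
--         content_lines.append(line)
--
--     return '\n'.join(content_lines).strip()
-- ===== SOURCE B (Python) =====
-- def _skip_line(line: str) -> bool:
--     line_lower = line.lower()
--     return (not line.strip()
--             or line.startswith("TITLE:")
--             or line.startswith("DESCRIPTION:")
--             or line.startswith("---")
--             or ("documentation for" in line_lower and "context7" in line_lower))
--
--
-- def _clean_documentation_result(result: str) -> str:
--     lines = result.split('\n')
--     i = 0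
--     while i < len(lines) and _skip_line(lines[i]):
--         i += 1
--     return '\n'.join(lines[i:]).strip()
-- ===== Notes on version B (the rewrite author's own statement) =====
-- stated objective: simpler
-- what changed: Replaces the flag-and-append accumulation loop with a drop-the-leading-run-of-skip-lines step (advance an index past header/blank lines, then join the remaining suffix), exploiting that in_content is monotone.
import Mathlib
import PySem

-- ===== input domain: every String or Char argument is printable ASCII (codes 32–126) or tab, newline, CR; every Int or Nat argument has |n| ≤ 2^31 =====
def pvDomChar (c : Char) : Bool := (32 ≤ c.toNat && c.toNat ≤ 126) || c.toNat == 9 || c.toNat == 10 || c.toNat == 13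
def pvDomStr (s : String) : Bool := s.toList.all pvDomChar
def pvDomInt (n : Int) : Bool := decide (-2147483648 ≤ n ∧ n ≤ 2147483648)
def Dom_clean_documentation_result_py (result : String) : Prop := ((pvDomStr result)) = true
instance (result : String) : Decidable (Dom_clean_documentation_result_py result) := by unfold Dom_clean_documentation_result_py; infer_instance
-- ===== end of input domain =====

-- B replaces A's flag-and-append loop by dropping the leading run of skip lines, then joining the suffix (objective: simpler).

-- ===== PORT A =====
-- one step of A's for-loop over (content_lines, in_content)
def pvStepA (st : List String × Bool) (line : String) : List String × Bool :=
  let line_lower := PySem.Str.lower line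
  if (PySem.Str.strip line == "") && !st.2 then st
  else if !st.2 &&
      (PySem.Str.startswith line "TITLE:" ||
       PySem.Str.startswith line "DESCRIPTION:" ||
       PySem.Str.startswith line "---" ||
       (PySem.Str.isIn "documentation for" line_lower && PySem.Str.isIn "context7" line_lower)) then st
  else (st.1 ++ [line], true)

def clean_documentation_result_py (result : String) : String :=
  PySem.Str.strip (PySem.Str.join "\n"
    ((((PySem.Str.split? result "\n").getD []).foldl pvStepA ([], false)).1))

-- ===== PORT B =====
-- Source B's _skip_line
def pvSkipLine (line : String) : Bool :=
  let line_lower := PySem.Str.lower line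
  (PySem.Str.strip line == "") ||
  PySem.Str.startswith line "TITLE:" ||
  PySem.Str.startswith line "DESCRIPTION:" ||
  PySem.Str.startswith line "---" ||
  (PySem.Str.isIn "documentation for" line_lower && PySem.Str.isIn "context7" line_lower)

-- Source B's while loop advancing an index and then taking lines[i:], as structural recursion
def pvDropSkip (ls : List String) : List String :=
  match ls with
  | [] => []
  | l :: rest => if pvSkipLine l then pvDropSkip rest else l :: rest

def clean_documentation_result_py_alt (result : String) : String :=
  PySem.Str.strip (PySem.Str.join "\n" (pvDropSkip ((PySem.Str.split? result "\n").getD [])))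

-- ===== PRECONDITION & SPEC =====
def Spec_clean_documentation_result_py (result : String) (out : String) : Prop := out = clean_documentation_result_py_alt result
instance (result : String) (out : String) : Decidable (Spec_clean_documentation_result_py result out) := by unfold Spec_clean_documentation_result_py; infer_instance

-- ===== CLAIM (what is proved, stated in full; the proofs are below) =====
def Claim_equal_clean_documentation_result_py : Prop := ∀ (result : String), Dom_clean_documentation_result_py result → Spec_clean_documentation_result_py result (clean_documentation_result_py result)

-- ===== LEMMAS AND PROOFS =====

-- one step of A before content: skip exactly the pvSkipLine lines, else append and set the flag
lemma stepA_false (acc : List String) (l : String) :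
    pvStepA (acc, false) l = if pvSkipLine l then (acc, false) else (acc ++ [l], true) := by
  unfold pvStepA pvSkipLine
  cases hb1 : (PySem.Str.strip l == "") <;>
  cases hb2 : PySem.Str.startswith l "TITLE:" <;>
  cases hb3 : PySem.Str.startswith l "DESCRIPTION:" <;>
  cases hb4 : PySem.Str.startswith l "---" <;>
  cases hb5 : (PySem.Str.isIn "documentation for" (PySem.Str.lower l) && PySem.Str.isIn "context7" (PySem.Str.lower l)) <;>
  simp only [hb5, Bool.not_false, Bool.and_true, Bool.and_false, Bool.or_false,
    Bool.or_true, reduceIte] <;> simp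

-- one step of A after content: every line is appended
lemma stepA_true (acc : List String) (l : String) :
    pvStepA (acc, true) l = (acc ++ [l], true) := by
  simp [pvStepA]

-- once in_content is true, the rest of A's loop appends every remaining line
lemma foldl_stepA_true (ls : List String) (acc : List String) :
    ls.foldl pvStepA (acc, true) = (acc ++ ls, true) := by
  induction ls generalizing acc with
  | nil => simp
  | cons l rest ih => simp [stepA_true, ih]

-- A's whole loop from the initial state computes B's dropped-prefix suffix
lemma foldl_stepA_eq_drop (ls : List String) :
    ls.foldl pvStepA ([], false) = (pvDropSkip ls, (pvDropSkip ls ≠ [] : Bool)) := by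
  induction ls with
  | nil => simp [pvDropSkip]
  | cons l rest ih =>
    simp only [List.foldl_cons, pvDropSkip, stepA_false]
    by_cases h : pvSkipLine l = true
    · simp only [h, if_true, ih]
    · simp only [Bool.not_eq_true] at h
      simp only [h, Bool.false_eq_true, if_false, List.nil_append, foldl_stepA_true]
      simp

-- ===== VERDICT (by name: the statement is the Claim_ definition above) =====
theorem clean_documentation_result_py_spec : Claim_equal_clean_documentation_result_py := by
  intro result _
  unfold Spec_clean_documentation_result_py clean_documentation_result_py clean_documentation_result_py_alt
  rw [foldl_stepA_eq_drop]
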